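-- pv_equiv track=rewrite | github.com/AhiZhang/modelisation_TP | TP_6_integration.py | integrepoly
-- ===== SOURCE A (Python) =====
-- def integrepoly(P):
--     res = 0
--     n_fact = 1
--     for idx, k in enumerate(P):
--         if idx == 0:
--             res += n_fact * k
--             continue
--
--         n_fact *= idx
--         res += n_fact * k
--
--     return res
-- ===== SOURCE B (Python) =====
-- def integrepoly(P):
--     # Reverse Horner scheme: P[0] + 1*(P[1] + 2*(P[2] + 3*(...)))
--     if not P:
--         return 0
--     acc = 0
--     for i in range(len(P) - 1, 0, -1):
--         acc = i * (acc + P[i])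
--     return acc + P[0]
-- ===== Notes on version B (the rewrite author's own statement) =====
-- stated objective: alternative
-- what changed: Replaces the forward accumulation of a running factorial times each coefficient by a reverse Horner evaluation that traverses the list from the highest index down, keeping a single accumulator and never forming a factorial.
import Mathlib
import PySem

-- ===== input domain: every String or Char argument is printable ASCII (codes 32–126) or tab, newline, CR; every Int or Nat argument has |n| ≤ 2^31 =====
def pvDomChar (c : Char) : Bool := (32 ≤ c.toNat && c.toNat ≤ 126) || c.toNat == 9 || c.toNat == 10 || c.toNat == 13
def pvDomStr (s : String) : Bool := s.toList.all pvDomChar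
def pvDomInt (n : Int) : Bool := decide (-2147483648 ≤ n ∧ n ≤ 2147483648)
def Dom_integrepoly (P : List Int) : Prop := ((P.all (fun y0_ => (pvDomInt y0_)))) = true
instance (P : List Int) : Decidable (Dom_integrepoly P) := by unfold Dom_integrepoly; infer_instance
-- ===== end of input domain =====

-- B evaluates the same weighted factorial sum by a reverse Horner scheme traversing the list from the top index down (alternative decomposition); return values proved equal on all inputs.

-- ===== PORT A =====
-- literal port of A's loop over enumerate(P) with state (res, n_fact)
def integrepoly (P : List Int) : Int :=
  ((PySem.List.enumerate P 0).foldl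
    (fun (st : Int × Int) (p : Int × Int) =>
      if p.1 = 0 then (st.1 + st.2 * p.2, st.2)
      else (st.1 + (st.2 * p.1) * p.2, st.2 * p.1))
    (0, 1)).1

-- ===== PORT B =====
-- the for-loop 'for i in range(len(P)-1, 0, -1): acc = i*(acc + P[i])' as a countdown
-- recursion on i; P[i] is ported with pyGet? (i is always in range here, so exact)
def integrepolyAltLoop (P : List Int) (i : Nat) (acc : Int) : Int :=
  match i with
  | 0 => acc
  | j + 1 =>
      integrepolyAltLoop P j
        (((j + 1 : Nat) : Int) * (acc + (PySem.List.pyGet? P ((j + 1 : Nat) : Int)).getD 0))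

def integrepoly_alt (P : List Int) : Int :=
  if P = [] then 0
  else integrepolyAltLoop P (P.length - 1) 0 + (PySem.List.pyGet? P 0).getD 0

-- ===== PRECONDITION & SPEC =====
def Spec_integrepoly (P : List Int) (out : Int) : Prop := out = integrepoly_alt P
instance (P : List Int) (out : Int) : Decidable (Spec_integrepoly P out) := by unfold Spec_integrepoly; infer_instance

-- ===== CLAIM (what is proved, stated in full; the proofs are below) =====
def Claim_equal_integrepoly : Prop := ∀ (P : List Int), Dom_integrepoly P → Spec_integrepoly P (integrepoly P)

-- ===== LEMMAS AND PROOFS =====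

-- n! as an Int
def pvFact : Nat → Int
  | 0 => 1
  | n + 1 => pvFact n * ((n + 1 : Nat) : Int)

-- weighted sum of xs with factorial weights starting at index i
def pvSumF (xs : List Int) (i : Nat) : Int :=
  match xs with
  | [] => 0
  | k :: r => pvFact i * k + pvSumF r (i + 1)

-- partial sum Σ_{t=1..j} t! * P[t]
def pvSumTail (P : List Int) : Nat → Int
  | 0 => 0
  | j + 1 => pvSumTail P j + pvFact (j + 1) * (PySem.List.pyGet? P ((j + 1 : Nat) : Int)).getD 0

theorem pvA_loop (xs : List Int) : ∀ (i : Nat) (res : Int),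
    (PySem.List.enumerate xs ((i : Int) + 1)).foldl
      (fun (st : Int × Int) (p : Int × Int) =>
        if p.1 = 0 then (st.1 + st.2 * p.2, st.2)
        else (st.1 + (st.2 * p.1) * p.2, st.2 * p.1))
      (res, pvFact i)
    = (res + pvSumF xs (i + 1), pvFact (i + xs.length)) := by
  induction xs with
  | nil => intro i res; simp [PySem.List.enumerate_nil, pvSumF]
  | cons k r ih =>
    intro i res
    rw [PySem.List.enumerate_cons]
    have hne : ¬ ((i : Int) + 1 = 0) := by omega
    simp only [List.foldl_cons, hne, if_false]
    have hfact : pvFact i * ((i : Int) + 1) = pvFact (i + 1) := by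
      simp [pvFact]
    have h2 : ((i : Int) + 1) + 1 = ((i + 1 : Nat) : Int) + 1 := by push_cast; ring
    rw [hfact, h2, ih (i + 1)]
    simp only [pvSumF, Prod.mk.injEq]
    refine ⟨by ring, ?_⟩
    congr 1
    simp only [List.length_cons]
    omega

theorem pvA_eq_sumF (P : List Int) : integrepoly P = pvSumF P 0 := by
  cases P with
  | nil => simp [integrepoly, PySem.List.enumerate_nil, pvSumF]
  | cons k r =>
    unfold integrepoly
    rw [PySem.List.enumerate_cons]
    have h := pvA_loop r 0 k
    rw [show pvFact 0 = (1 : Int) from rfl] at h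
    norm_num at h ⊢
    rw [h]
    simp [pvSumF, pvFact]

theorem pvB_loop (P : List Int) : ∀ (j : Nat) (acc : Int),
    integrepolyAltLoop P j acc = pvSumTail P j + pvFact j * acc := by
  intro j
  induction j with
  | zero => intro acc; simp [integrepolyAltLoop, pvSumTail, pvFact]
  | succ j ih =>
    intro acc
    rw [integrepolyAltLoop, ih]
    simp only [pvSumTail]
    have hfact : pvFact j * ((j + 1 : Nat) : Int) = pvFact (j + 1) := rfl
    push_cast at hfact ⊢
    rw [← hfact]
    ring

theorem pvSumF_append (l : List Int) : ∀ (x : Int) (i : Nat),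
    pvSumF (l ++ [x]) i = pvSumF l i + pvFact (i + l.length) * x := by
  induction l with
  | nil => intro x i; simp [pvSumF]
  | cons k r ih =>
    intro x i
    simp only [List.cons_append, pvSumF, ih]
    have : i + 1 + r.length = i + (k :: r).length := by simp; omega
    rw [this]
    ring

theorem pvSumTail_append (Q : List Int) (x : Int) : ∀ (j : Nat), j < Q.length →
    pvSumTail (Q ++ [x]) j = pvSumTail Q j := by
  intro j
  induction j with
  | zero => intro _; simp [pvSumTail]
  | succ j ih =>
    intro hj
    simp only [pvSumTail]
    rw [ih (by omega)]
    have hidx : (PySem.List.pyGet? (Q ++ [x]) ((j + 1 : Nat) : Int)).getD 0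
        = (PySem.List.pyGet? Q ((j + 1 : Nat) : Int)).getD 0 := by
      simp only [PySem.List.pyGet?_natCast]
      rw [List.getElem?_append_left hj]
    rw [hidx]

theorem pvSumTail_eq (p0 : Int) : ∀ (rest : List Int),
    pvSumTail (p0 :: rest) rest.length = pvSumF rest 1 := by
  intro rest
  induction rest using List.reverseRecOn with
  | nil => simp [pvSumTail, pvSumF]
  | append_singleton l x ih =>
    rw [List.length_append, List.length_singleton]
    simp only [pvSumTail]
    have hQ : p0 :: (l ++ [x]) = (p0 :: l) ++ [x] := by simp
    rw [hQ, pvSumTail_append (p0 :: l) x l.length (by simp)]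
    rw [ih, pvSumF_append]
    have hget : (PySem.List.pyGet? ((p0 :: l) ++ [x]) ((l.length + 1 : Nat) : Int)).getD 0 = x := by
      simp only [PySem.List.pyGet?_natCast]
      rw [List.getElem?_append_right (by simp)]
      simp
    rw [hget]
    have hc : 1 + l.length = l.length + 1 := by omega
    rw [hc]

theorem pvB_eq_sumF (P : List Int) : integrepoly_alt P = pvSumF P 0 := by
  cases P with
  | nil => simp [integrepoly_alt, pvSumF]
  | cons p0 rest =>
    unfold integrepoly_alt
    rw [if_neg (by simp)]
    rw [pvB_loop]
    have hlen : (p0 :: rest).length - 1 = rest.length := by simp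
    rw [hlen, pvSumTail_eq p0 rest]
    have hget : (PySem.List.pyGet? (p0 :: rest) 0).getD 0 = p0 := by
      simp [PySem.List.pyGet?, PySem.List.pyIdx?]
    rw [hget]
    simp [pvSumF, pvFact]
    ring

-- ===== VERDICT (by name: the statement is the Claim_ definition above) =====
theorem integrepoly_spec : Claim_equal_integrepoly := by
  intro P _
  unfold Spec_integrepoly
  rw [pvA_eq_sumF, pvB_eq_sumF]
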